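-- pv_equiv track=rewrite | github.com/syntra-vindevoy/python-1-2024 | yves/ex_10_11_v2.py | has_reversed_pairs
-- ===== SOURCE A (Python) =====
-- def has_reversed_pairs(words):
--     repairs = []
--
--     for i in range(len(words) - 1):
--         for j in range(i + 1, len(words)):
--             if words[i] == words[j][::-1]:
--                 repairs.append(words[i])
--                 repairs.append(words[j])
--
--     return repairs
-- ===== SOURCE B (Python) =====
-- def has_reversed_pairs(words):
--     # One pass builds an index word -> ascending positions; then for each i,
--     # only the positions of words[i] reversed are scanned for partners j > i.
--     pos = {}
--     for i, w in enumerate(words):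
--         pos.setdefault(w, []).append(i)
--     repairs = []
--     for i, w in enumerate(words):
--         for j in pos.get(w[::-1], []):
--             if j > i:
--                 repairs.append(w)
--                 repairs.append(words[j])
--     return repairs
-- ===== Notes on version B (the rewrite author's own statement) =====
-- stated objective: faster
-- what changed: B builds a hash index from word to its ascending positions in one pass, then for each word looks up only the positions of its reverse with j > i, instead of A's all-pairs nested scan.
import Mathlib
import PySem

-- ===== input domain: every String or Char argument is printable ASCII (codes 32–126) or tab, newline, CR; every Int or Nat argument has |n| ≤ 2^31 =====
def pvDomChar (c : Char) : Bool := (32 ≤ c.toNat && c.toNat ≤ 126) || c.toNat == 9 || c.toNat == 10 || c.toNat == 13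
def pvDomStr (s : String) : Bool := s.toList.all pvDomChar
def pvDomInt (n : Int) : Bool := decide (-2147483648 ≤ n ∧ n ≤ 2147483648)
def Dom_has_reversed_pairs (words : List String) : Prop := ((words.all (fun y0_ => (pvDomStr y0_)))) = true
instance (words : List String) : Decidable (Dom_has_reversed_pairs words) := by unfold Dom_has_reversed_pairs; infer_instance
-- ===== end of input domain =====

-- B replaces A's all-pairs scan by a hash index from word to its ascending positions,
-- so each word only scans the positions of its own reverse (objective: faster).

-- ===== PORT A =====
-- indices i, j always lie in range here, so pyGetD is exact (no IndexError is possible)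
def has_reversed_pairs (words : List String) : List String :=
  (PySem.List.pyRange 0 (PySem.List.len words - 1)).foldl (fun repairs i =>
    (PySem.List.pyRange (i + 1) (PySem.List.len words)).foldl (fun repairs j =>
      if PySem.List.pyGetD words i "" =
          (PySem.Str.slice? (PySem.List.pyGetD words j "") none none (-1)).getD "" then
        repairs ++ [PySem.List.pyGetD words i "", PySem.List.pyGetD words j ""]
      else repairs) repairs) []

-- ===== PORT B =====
-- pos.setdefault(w, []).append(i) is d.modify w [] (· ++ [i]); w[::-1] is slice? with step -1
def has_reversed_pairs_alt (words : List String) : List String :=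
  let pos : PySem.Dict String (List Int) :=
    (PySem.List.enumerate words).foldl
      (fun d p => d.modify p.2 [] (fun l => l ++ [p.1])) PySem.Dict.empty
  (PySem.List.enumerate words).foldl (fun repairs p =>
    (pos.getD ((PySem.Str.slice? p.2 none none (-1)).getD "") []).foldl
      (fun repairs j =>
        if p.1 < j then repairs ++ [p.2, PySem.List.pyGetD words j ""] else repairs)
      repairs) []

-- ===== PRECONDITION & SPEC =====
def Spec_has_reversed_pairs (words : List String) (out : List String) : Prop := out = has_reversed_pairs_alt words
instance (words : List String) (out : List String) : Decidable (Spec_has_reversed_pairs words out) := by unfold Spec_has_reversed_pairs; infer_instance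

-- ===== CLAIM (what is proved, stated in full; the proofs are below) =====
def Claim_equal_has_reversed_pairs : Prop := ∀ (words : List String), Dom_has_reversed_pairs words → Spec_has_reversed_pairs words (has_reversed_pairs words)

-- ===== LEMMAS AND PROOFS =====

def pvRev (s : String) : String := String.ofList s.toList.reverse

theorem pvRev_def (s : String) : pvRev s = String.ofList s.toList.reverse := rfl

theorem pvRev_rev (s : String) : pvRev (pvRev s) = s := by
  simp [pvRev]

theorem pvRev_eq_comm (a b : String) : a = pvRev b ↔ b = pvRev a := by
  constructor <;> rintro rfl <;> rw [pvRev_rev]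

theorem pv_foldl_if_append {α β : Type} (p : α → Prop) [DecidablePred p]
    (g : α → List β) (l : List α) (acc : List β) :
    l.foldl (fun acc x => if p x then acc ++ g x else acc) acc
      = acc ++ l.flatMap (fun x => if p x then g x else []) := by
  induction l generalizing acc with
  | nil => simp
  | cons x xs ih => by_cases h : p x <;> simp [h, ih]

theorem pv_flatMap_filter {α β : Type} (p : α → Bool) (g : α → List β) (l : List α) :
    (l.filter p).flatMap g = l.flatMap (fun x => if p x then g x else []) := by
  induction l with
  | nil => rfl
  | cons x xs ih => by_cases h : p x <;> simp [h, ih]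

theorem pv_flatMap_congr {α β : Type} {f g : α → List β} {l : List α}
    (h : ∀ x ∈ l, f x = g x) : l.flatMap f = l.flatMap g := by
  induction l with
  | nil => rfl
  | cons x xs ih =>
    simp only [List.flatMap_cons, h x (by simp), ih (fun y hy => h y (by simp [hy]))]

-- the index built by B: positions j (ascending) with words[j] = c
theorem pv_pos_getD (words : List String) (c : String) :
    ((PySem.List.enumerate words).foldl
        (fun d p => d.modify p.2 [] (fun l => l ++ [p.1]))
        (PySem.Dict.empty : PySem.Dict String (List Int))).getD c []
      = ((PySem.List.enumerate words).filter (fun p => p.2 == c)).map (fun p => p.1) := by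
  have hfold : (PySem.List.enumerate words).foldl
        (fun d p => d.modify p.2 [] (fun l => l ++ [p.1]))
        (PySem.Dict.empty : PySem.Dict String (List Int))
      = ((PySem.List.enumerate words).map (fun p => (p.2, p.1))).foldl
        (fun d q => d.modify q.1 [] (fun l => l ++ [q.2])) PySem.Dict.empty := by
    rw [List.foldl_map]
  rw [hfold, PySem.Dict.getD_foldl_modify_append]
  simp [List.filter_map, Function.comp_def]

-- ===== VERDICT =====
theorem has_reversed_pairs_spec : Claim_equal_has_reversed_pairs := by
  intro words _
  unfold Spec_has_reversed_pairs has_reversed_pairs has_reversed_pairs_alt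
  simp only [PySem.Str.slice?_none_none_neg_one, Option.getD_some, ← pvRev_def]
  set n : Int := PySem.List.len words with hn
  have hlen : n = (words.length : Int) := by simp [hn]
  -- inner loops as flatMap
  have innerA : ∀ (i : Int) (acc : List String),
      (PySem.List.pyRange (i + 1) n).foldl (fun repairs j =>
        if PySem.List.pyGetD words i "" = pvRev (PySem.List.pyGetD words j "") then
          repairs ++ [PySem.List.pyGetD words i "", PySem.List.pyGetD words j ""]
        else repairs) acc
      = acc ++ (PySem.List.pyRange (i + 1) n).flatMap (fun j =>
          if PySem.List.pyGetD words i "" = pvRev (PySem.List.pyGetD words j "") then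
            [PySem.List.pyGetD words i "", PySem.List.pyGetD words j ""] else []) := by
    intro i acc
    exact pv_foldl_if_append _ _ _ acc
  have innerB : ∀ (w : String) (i : Int) (L : List Int) (acc : List String),
      L.foldl (fun repairs j =>
        if i < j then repairs ++ [w, PySem.List.pyGetD words j ""] else repairs) acc
      = acc ++ L.flatMap (fun j =>
          if i < j then [w, PySem.List.pyGetD words j ""] else []) := by
    intro w i L acc
    exact pv_foldl_if_append _ _ _ acc
  -- rewrite both outer folds to flatMaps
  have hA : (PySem.List.pyRange 0 (n - 1)).foldl (fun repairs i =>
      (PySem.List.pyRange (i + 1) n).foldl (fun repairs j =>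
        if PySem.List.pyGetD words i "" = pvRev (PySem.List.pyGetD words j "") then
          repairs ++ [PySem.List.pyGetD words i "", PySem.List.pyGetD words j ""]
        else repairs) repairs) []
      = (PySem.List.pyRange 0 (n - 1)).flatMap (fun i =>
          (PySem.List.pyRange (i + 1) n).flatMap (fun j =>
            if PySem.List.pyGetD words i "" = pvRev (PySem.List.pyGetD words j "") then
              [PySem.List.pyGetD words i "", PySem.List.pyGetD words j ""] else [])) := by
    rw [show (fun (repairs : List String) (i : Int) =>
        (PySem.List.pyRange (i + 1) n).foldl (fun repairs j =>
          if PySem.List.pyGetD words i "" = pvRev (PySem.List.pyGetD words j "") then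
            repairs ++ [PySem.List.pyGetD words i "", PySem.List.pyGetD words j ""]
          else repairs) repairs)
      = (fun repairs i => repairs ++ (PySem.List.pyRange (i + 1) n).flatMap (fun j =>
          if PySem.List.pyGetD words i "" = pvRev (PySem.List.pyGetD words j "") then
            [PySem.List.pyGetD words i "", PySem.List.pyGetD words j ""] else []))
      from funext₂ (fun acc i => innerA i acc)]
    rw [PySem.List.foldl_append_eq_flatMap]
    simp
  rw [hA]
  -- B side to a flatMap
  set posD : PySem.Dict String (List Int) :=
    (PySem.List.enumerate words).foldl
      (fun d p => d.modify p.2 [] (fun l => l ++ [p.1])) PySem.Dict.empty with hpos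
  rw [show (fun (repairs : List String) (p : Int × String) =>
      (posD.getD (pvRev p.2) []).foldl (fun repairs j =>
        if p.1 < j then repairs ++ [p.2, PySem.List.pyGetD words j ""] else repairs) repairs)
    = (fun repairs p => repairs ++ (posD.getD (pvRev p.2) []).flatMap (fun j =>
        if p.1 < j then [p.2, PySem.List.pyGetD words j ""] else []))
    from funext₂ (fun acc p => innerB p.2 p.1 _ acc)]
  rw [PySem.List.foldl_append_eq_flatMap]
  simp only [List.nil_append]
  -- the index lists
  have hposD : ∀ c, posD.getD c []
      = ((PySem.List.pyRange 0 n).filter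
          (fun j => PySem.List.pyGetD words j "" == c)) := by
    intro c
    rw [hpos, pv_pos_getD, PySem.List.enumerate_eq_map_pyRange words ""]
    simp [List.filter_map, Function.comp_def, hlen]
  -- per-index inner equality, for 0 ≤ i < n
  have hinner : ∀ i : Int, 0 ≤ i → i < n →
      (PySem.List.pyRange (i + 1) n).flatMap (fun j =>
        if PySem.List.pyGetD words i "" = pvRev (PySem.List.pyGetD words j "") then
          [PySem.List.pyGetD words i "", PySem.List.pyGetD words j ""] else [])
      = (posD.getD (pvRev (PySem.List.pyGetD words i "")) []).flatMap (fun j =>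
          if i < j then [PySem.List.pyGetD words i "", PySem.List.pyGetD words j ""] else []) := by
    intro i h0 h1
    rw [hposD, pv_flatMap_filter]
    rw [PySem.List.pyRange_one_append 0 (i+1) n (by omega) (by omega)]
    rw [List.flatMap_append]
    have hlo : (PySem.List.pyRange 0 (i+1)).flatMap (fun j =>
        if PySem.List.pyGetD words j "" == pvRev (PySem.List.pyGetD words i "") then
          (if i < j then [PySem.List.pyGetD words i "", PySem.List.pyGetD words j ""] else [])
        else []) = [] := by
      rw [pv_flatMap_congr (g := fun _ => ([] : List String))
        (by intro j hj
            have := PySem.List.mem_pyRange_one.mp hj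
            have hij : ¬ i < j := by omega
            simp [hij])]
      simp
    rw [hlo, List.nil_append]
    refine pv_flatMap_congr ?_
    intro j hj
    have hij : i < j := by
      have := PySem.List.mem_pyRange_one.mp hj; omega
    by_cases h : PySem.List.pyGetD words i "" = pvRev (PySem.List.pyGetD words j "")
    · have h' : PySem.List.pyGetD words j "" = pvRev (PySem.List.pyGetD words i "") :=
        (pvRev_eq_comm _ _).mp h
      rw [if_pos h, if_pos (beq_iff_eq.mpr h'), if_pos hij]
    · have h' : PySem.List.pyGetD words j "" ≠ pvRev (PySem.List.pyGetD words i "") :=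
        fun hc => h ((pvRev_eq_comm _ _).mp hc)
      rw [if_neg h, if_neg (by simpa using h')]
  -- outer: rewrite B's enumerate as a range and match index by index
  rw [PySem.List.enumerate_eq_map_pyRange words "", List.flatMap_map]
  rw [show (PySem.List.pyRange 0 (PySem.List.len words)) = PySem.List.pyRange 0 n from by rw [hn]]
  have hext : (PySem.List.pyRange 0 n).flatMap (fun i =>
      (PySem.List.pyRange (i + 1) n).flatMap (fun j =>
        if PySem.List.pyGetD words i "" = pvRev (PySem.List.pyGetD words j "") then
          [PySem.List.pyGetD words i "", PySem.List.pyGetD words j ""] else []))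
      = (PySem.List.pyRange 0 (n - 1)).flatMap (fun i =>
        (PySem.List.pyRange (i + 1) n).flatMap (fun j =>
          if PySem.List.pyGetD words i "" = pvRev (PySem.List.pyGetD words j "") then
            [PySem.List.pyGetD words i "", PySem.List.pyGetD words j ""] else [])) := by
    by_cases hn0 : n ≤ 0
    · rw [PySem.List.pyRange_one_eq_nil (by omega), PySem.List.pyRange_one_eq_nil (by omega)]
    · rw [show n = (n - 1) + 1 from by ring, PySem.List.pyRange_one_succ_right (by omega)]
      simp only [List.flatMap_append, List.flatMap_cons, List.flatMap_nil]
      rw [show (n - 1 + 1) = n from by ring]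
      rw [PySem.List.pyRange_one_eq_nil (le_refl n)]
      simp
  rw [← hext]
  refine pv_flatMap_congr ?_
  intro i hi
  have := PySem.List.mem_pyRange_one.mp hi
  exact hinner i this.1 this.2
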